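-- pv_equiv track=rewrite | github.com/tbachu/UNCSquad | src/agent/tools.py | categorize_health_metrics
-- ===== SOURCE A (Python) =====
-- from typing import Dict, Any, List, Optional
--
-- def categorize_health_metrics(metrics: Dict[str, Any]) -> Dict[str, List[str]]:
--     """
--     Categorizes health metrics by type.
--
--     Returns:
--         Dictionary with categories as keys and metric names as values
--     """
--     categories = {
--         'cardiovascular': ['blood_pressure', 'heart_rate', 'cholesterol', 'ldl', 'hdl', 'triglycerides'],
--         'metabolic': ['glucose', 'hba1c', 'insulin', 'thyroid'],
--         'hematology': ['hemoglobin', 'hematocrit', 'wbc', 'rbc', 'platelets'],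
--         'renal': ['creatinine', 'bun', 'egfr', 'uric_acid'],
--         'hepatic': ['alt', 'ast', 'bilirubin', 'albumin'],
--         'vitals': ['weight', 'height', 'bmi', 'temperature', 'oxygen_saturation']
--     }
--
--     categorized = {cat: [] for cat in categories}
--
--     for metric in metrics:
--         metric_lower = metric.lower()
--         for category, keywords in categories.items():
--             if any(keyword in metric_lower for keyword in keywords):
--                 categorized[category].append(metric)
--                 break
--         else:
--             # If no category matches, add to 'other'
--             if 'other' not in categorized:
--                 categorized['other'] = []
--             categorized['other'].append(metric)
--
--     # Remove empty categories
--     return {k: v for k, v in categorized.items() if v}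
-- ===== SOURCE B (Python) =====
-- def categorize_health_metrics(metrics):
--     """Category-major re-implementation: one pass per category with an
--     'assigned' set, instead of a per-metric inner scan with break/else."""
--     categories = {
--         'cardiovascular': ['blood_pressure', 'heart_rate', 'cholesterol', 'ldl', 'hdl', 'triglycerides'],
--         'metabolic': ['glucose', 'hba1c', 'insulin', 'thyroid'],
--         'hematology': ['hemoglobin', 'hematocrit', 'wbc', 'rbc', 'platelets'],
--         'renal': ['creatinine', 'bun', 'egfr', 'uric_acid'],
--         'hepatic': ['alt', 'ast', 'bilirubin', 'albumin'],
--         'vitals': ['weight', 'height', 'bmi', 'temperature', 'oxygen_saturation']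
--     }
--     assigned = set()
--     result = {}
--     for category, keywords in categories.items():
--         bucket = [m for m in metrics
--                   if m not in assigned and any(k in m.lower() for k in keywords)]
--         if bucket:
--             result[category] = bucket
--             assigned.update(bucket)
--     other = [m for m in metrics if m not in assigned]
--     if other:
--         result['other'] = other
--     return result
-- ===== Notes on version B (the rewrite author's own statement) =====
-- stated objective: alternative
-- what changed: Restructured from metric-major (per-metric inner category scan with break/else into a pre-built dict) to category-major (one filtering pass per fixed category guarded by an 'assigned' set, then one pass for 'other'), building only non-empty buckets instead of filtering empties afterwards.
import Mathlib
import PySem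

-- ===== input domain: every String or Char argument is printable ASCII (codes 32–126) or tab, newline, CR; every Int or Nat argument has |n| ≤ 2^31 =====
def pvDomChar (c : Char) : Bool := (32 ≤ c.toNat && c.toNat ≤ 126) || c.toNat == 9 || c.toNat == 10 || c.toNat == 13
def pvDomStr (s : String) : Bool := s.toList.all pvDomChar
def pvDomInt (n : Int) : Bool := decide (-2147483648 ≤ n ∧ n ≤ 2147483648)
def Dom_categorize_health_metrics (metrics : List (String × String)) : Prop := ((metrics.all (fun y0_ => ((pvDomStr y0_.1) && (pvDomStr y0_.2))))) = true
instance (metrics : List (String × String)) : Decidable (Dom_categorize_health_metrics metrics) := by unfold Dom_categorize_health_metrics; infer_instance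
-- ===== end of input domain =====

-- B restructures A's metric-major loop (inner category scan with break/else) into a
-- category-major pass guarded by an 'assigned' set; same results, similar cost.

-- ===== PORT A =====
-- the 'categories' dict literal both Pythons share
def healthCategories : List (String × List String) :=
  [("cardiovascular", ["blood_pressure", "heart_rate", "cholesterol", "ldl", "hdl", "triglycerides"]),
   ("metabolic", ["glucose", "hba1c", "insulin", "thyroid"]),
   ("hematology", ["hemoglobin", "hematocrit", "wbc", "rbc", "platelets"]),
   ("renal", ["creatinine", "bun", "egfr", "uric_acid"]),
   ("hepatic", ["alt", "ast", "bilirubin", "albumin"]),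
   ("vitals", ["weight", "height", "bmi", "temperature", "oxygen_saturation"])]

-- inner 'for category, keywords in categories.items(): if any(...) ... break / else' scan
def findCatA (ml : String) : Option String :=
  (healthCategories.find? (fun p => p.2.any (fun kw => PySem.Str.isIn kw ml))).map (·.1)

-- 'for metric in metrics:' body of A (metrics iterated as dict keys)
def loopA : PySem.Dict String (List String) → List String → PySem.Dict String (List String)
  | d, [] => d
  | d, m :: rest =>
    match findCatA (PySem.Str.lower m) with
    | some c => loopA (d.modify c [] (· ++ [m])) rest
    | none =>
        loopA ((if d.contains "other" then d else d.insert "other" []).modify "other" []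
                 (· ++ [m])) rest

def categorize_health_metrics (metrics : List (String × String)) : List (String × List String) :=
  let names := PySem.Set.ofList (metrics.map (·.1))  -- dict keys: distinct, first-occurrence order
  let categorized := healthCategories.foldl (fun d p => d.insert p.1 ([] : List String)) PySem.Dict.empty
  ((loopA categorized names).items).filter (fun p => !p.2.isEmpty)

-- ===== PORT B =====
def matchesCat (kws : List String) (m : String) : Bool :=
  kws.any (fun kw => PySem.Str.isIn kw (PySem.Str.lower m))

-- 'for category, keywords in categories.items():' body of B
def stepB (names : List String) (st : PySem.Set String × List (String × List String))
    (p : String × List String) : PySem.Set String × List (String × List String) :=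
  let bucket := names.filter (fun m => !(PySem.Set.contains st.1 m) && matchesCat p.2 m)
  if bucket.isEmpty then st else (PySem.Set.update st.1 bucket, st.2 ++ [(p.1, bucket)])

def categorize_health_metrics_alt (metrics : List (String × String)) : List (String × List String) :=
  let names := PySem.Set.ofList (metrics.map (·.1))  -- dict keys: distinct, first-occurrence order
  let st := healthCategories.foldl (stepB names) (PySem.Set.empty, [])
  let other := names.filter (fun m => !(PySem.Set.contains st.1 m))
  if other.isEmpty then st.2 else st.2 ++ [("other", other)]

-- ===== PRECONDITION & SPEC =====
def Spec_categorize_health_metrics (metrics : List (String × String)) (out : List (String × List String)) : Prop := out = categorize_health_metrics_alt metrics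
instance (metrics : List (String × String)) (out : List (String × List String)) : Decidable (Spec_categorize_health_metrics metrics out) := by unfold Spec_categorize_health_metrics; infer_instance

-- ===== CLAIM (what is proved, stated in full; the proofs are below) =====
def Claim_equal_categorize_health_metrics : Prop := ∀ (metrics : List (String × String)), Dom_categorize_health_metrics metrics → Spec_categorize_health_metrics metrics (categorize_health_metrics metrics)


-- ===== LEMMAS AND PROOFS =====

-- first category (by A's fixed order) whose keyword list matches m, if any
def firstIn (cs : List (String × List String)) (m : String) : Option String :=
  (cs.find? (fun p => matchesCat p.2 m)).map (·.1)

-- the category key metric m is appended under in A's loop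
def keyOfA (m : String) : String :=
  match firstIn healthCategories m with
  | some c => c
  | none => "other"

theorem findCatA_lower (m : String) :
    findCatA (PySem.Str.lower m) = firstIn healthCategories m := rfl

theorem otherStep (d : PySem.Dict String (List String)) (f : List String → List String) :
    ((if d.contains "other" then d else d.insert "other" []).modify "other" [] f)
      = d.modify "other" [] f := by
  by_cases h : d.contains "other"
  · simp [h]
  · simp only [Bool.not_eq_true] at h
    simp only [h, Bool.false_eq_true, if_false]
    unfold PySem.Dict.modify
    rw [PySem.Dict.insert_insert_self, PySem.Dict.getD_insert_self,
        PySem.Dict.getD_of_not_contains (h := h)]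

theorem loopA_eq_foldl (ms : List String) (d : PySem.Dict String (List String)) :
    loopA d ms
      = (ms.map (fun m => (keyOfA m, m))).foldl
          (fun d p => d.modify p.1 [] (fun v => v ++ [p.2])) d := by
  induction ms generalizing d with
  | nil => rfl
  | cons m rest ih =>
    rw [List.map_cons, List.foldl_cons]
    cases h : firstIn healthCategories m with
    | some c =>
      have hk : keyOfA m = c := by unfold keyOfA; rw [h]
      rw [loopA, findCatA_lower, h]
      dsimp only
      rw [ih, hk]
    | none =>
      have hk : keyOfA m = "other" := by unfold keyOfA; rw [h]
      rw [loopA, findCatA_lower, h]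
      dsimp only
      rw [hk, ih, otherStep]

theorem keyOfA_mem_or (m : String) :
    keyOfA m ∈ healthCategories.map (·.1) ∨ keyOfA m = "other" := by
  unfold keyOfA
  cases h : firstIn healthCategories m with
  | none => exact Or.inr rfl
  | some c =>
    left
    unfold firstIn at h
    obtain ⟨p, hp, rfl⟩ := Option.map_eq_some_iff.mp h
    exact List.mem_map.mpr ⟨p, List.mem_of_find?_eq_some hp, rfl⟩

theorem update_base (ks : List String)
    (h : ∀ k ∈ ks, k ∈ healthCategories.map (·.1) ∨ k = "other") :
    PySem.Set.update (healthCategories.map (·.1)) ks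
      = healthCategories.map (·.1) ++ (if "other" ∈ ks then ["other"] else []) := by
  rw [PySem.Set.update_eq_append_filter]
  congr 1
  have hall : ∀ x ∈ (PySem.Set.ofList ks).filter
      (fun y => !(PySem.Set.contains (healthCategories.map (·.1)) y)), x = "other" := by
    intro x hx
    rw [List.mem_filter] at hx
    obtain ⟨hx1, hx2⟩ := hx
    rcases h x ((PySem.Set.mem_ofList ks x).mp hx1) with hm | he
    · exfalso
      have hc : PySem.Set.contains (healthCategories.map (·.1)) x = true :=
        (PySem.Set.contains_iff _ _).mpr hm
      rw [hc] at hx2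
      simp at hx2
    · exact he
  have hnd : ((PySem.Set.ofList ks).filter
      (fun y => !(PySem.Set.contains (healthCategories.map (·.1)) y))).Nodup :=
    (PySem.Set.nodup_ofList ks).filter _
  have hmem : "other" ∈ (PySem.Set.ofList ks).filter
      (fun y => !(PySem.Set.contains (healthCategories.map (·.1)) y)) ↔ "other" ∈ ks := by
    rw [List.mem_filter, PySem.Set.mem_ofList]
    constructor
    · exact fun ⟨a, _⟩ => a
    · intro hk
      refine ⟨hk, ?_⟩
      decide
  by_cases hk : "other" ∈ ks
  · simp only [hk, if_true]
    generalize hl : (PySem.Set.ofList ks).filter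
      (fun y => !(PySem.Set.contains (healthCategories.map (·.1)) y)) = l at *
    match l, hall, hnd, hmem with
    | [], hall, _, hmem => exact absurd (hmem.mpr hk) (by simp)
    | [x], hall, _, _ => rw [hall x (by simp)]
    | x :: y :: t, hall, hnd, _ =>
      exfalso
      have hx := hall x (by simp)
      have hy := hall y (by simp)
      subst hx; rw [hy] at hnd; simp at hnd
  · simp only [hk, if_false]
    rw [List.eq_nil_iff_forall_not_mem]
    intro x hx
    exact hk (hmem.mp (hall x hx ▸ hx))

theorem getD_all_nil (ps : List (String × List String)) (c : String)
    (h : ∀ p ∈ ps, p.2 = ([] : List String)) :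
    (PySem.Dict.mk ps).getD c [] = [] := by
  induction ps with
  | nil => rfl
  | cons p t ih =>
    rw [PySem.Dict.getD_eq_get?_getD]
    obtain ⟨k, v⟩ := p
    rw [PySem.Dict.get?_mk_cons]
    by_cases hkc : (k == c)
    · simp only [hkc, if_true]
      have := h (k, v) (by simp)
      simp at this
      simp [this]
    · simp only [hkc, Bool.false_eq_true, if_false]
      rw [← PySem.Dict.getD_eq_get?_getD]
      exact ih (fun q hq => h q (List.mem_cons_of_mem _ hq))

-- A's result in closed form: key list = categories (+ "other" if needed), value = filter by keyOfA
theorem A_closed (names : List String) :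
    (loopA (healthCategories.foldl (fun d p => d.insert p.1 ([] : List String)) PySem.Dict.empty)
        names).items.filter (fun p => !p.2.isEmpty)
      = ((healthCategories.map (·.1)
            ++ (if "other" ∈ names.map keyOfA then ["other"] else [])).map
            (fun c => (c, names.filter (fun m => keyOfA m == c)))).filter
          (fun p => !p.2.isEmpty) := by
  have hinit : (healthCategories.foldl (fun d p => d.insert p.1 ([] : List String)) PySem.Dict.empty)
      = PySem.Dict.mk (healthCategories.map (fun p => (p.1, ([] : List String)))) := by
    apply PySem.Dict.ext
    rw [PySem.Dict.items_foldl_insert_fresh healthCategories (·.1) (fun _ => []) PySem.Dict.empty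
        (fun a _ => PySem.Dict.contains_empty _) (by decide)]
    rfl
  set init := PySem.Dict.mk (healthCategories.map (fun p => (p.1, ([] : List String)))) with hinitdef
  rw [hinit, loopA_eq_foldl]
  set final := (names.map (fun m => (keyOfA m, m))).foldl
      (fun d p => d.modify p.1 [] (fun v => v ++ [p.2])) init with hfinal
  have hikeys : init.keys = healthCategories.map (·.1) := by
    rw [hinitdef, PySem.Dict.keys_mk, List.map_map]
    rfl
  have hkeys : final.keys
      = healthCategories.map (·.1) ++ (if "other" ∈ names.map keyOfA then ["other"] else []) := by
    rw [hfinal, PySem.Dict.keys_foldl_modify_key (names.map (fun m => (keyOfA m, m)))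
          (fun p => p.1) ([] : List String)
          (fun (_ : PySem.Dict String (List String)) (p : String × String) (v : List String) => v ++ [p.2]) init,
        hikeys, List.map_map]
    have : (Prod.fst ∘ fun m => (keyOfA m, m)) = keyOfA := rfl
    rw [this]
    exact update_base _ (fun k hk => by
      obtain ⟨m, _, rfl⟩ := List.mem_map.mp hk
      exact keyOfA_mem_or m)
  have hnd : final.keys.Nodup := by
    rw [hfinal]
    exact PySem.Dict.nodup_keys_foldl_modify_key (names.map (fun m => (keyOfA m, m)))
      (fun p => p.1) ([] : List String)
      (fun (_ : PySem.Dict String (List String)) (p : String × String) (v : List String) => v ++ [p.2]) init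
      (by rw [hikeys]; decide)
  have hgetD : ∀ c, final.getD c [] = names.filter (fun m => keyOfA m == c) := by
    intro c
    rw [hfinal, PySem.Dict.getD_foldl_modify_append]
    rw [hinitdef, getD_all_nil _ _ (by simp)]
    rw [List.nil_append, List.filter_map, List.map_map]
    simp only [Function.comp_def]
    simp
  rw [PySem.Dict.items_eq_map_keys final hnd [], hkeys]
  congr 1
  exact List.map_congr_left (fun k _ => by rw [hgetD k])

-- B's buckets, category-major, with 'pre' abstracting the assigned set so far
def bkts (names : List String) : List (String × List String) → (String → Bool) → List (String × List String)
  | [], _ => []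
  | (c, kws) :: t, pre =>
      (if (names.filter (fun m => !pre m && matchesCat kws m)).isEmpty then []
       else [(c, names.filter (fun m => !pre m && matchesCat kws m))]) ++
      bkts names t (fun m => pre m || matchesCat kws m)


theorem contains_update_iff (s : PySem.Set String) (b : List String) (m : String) :
    PySem.Set.contains (PySem.Set.update s b) m = (PySem.Set.contains s m || decide (m ∈ b)) := by
  rw [Bool.eq_iff_iff]
  simp only [Bool.or_eq_true, decide_eq_true_eq, PySem.Set.contains_iff]
  rw [PySem.Set.update_eq_append_filter]
  constructor
  · intro hm
    rcases List.mem_append.mp hm with h1 | h1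
    · exact Or.inl h1
    · exact Or.inr ((PySem.Set.mem_ofList b m).mp (List.mem_filter.mp h1).1)
  · intro hm
    rcases hm with h1 | h1
    · exact List.mem_append.mpr (Or.inl h1)
    · by_cases hs : m ∈ s
      · exact List.mem_append.mpr (Or.inl hs)
      · refine List.mem_append.mpr (Or.inr (List.mem_filter.mpr ⟨(PySem.Set.mem_ofList b m).mpr h1, ?_⟩))
        simp only [Bool.not_eq_eq_eq_not, Bool.not_true]
        rw [← Bool.not_eq_true, PySem.Set.contains_iff]
        exact hs

theorem Bfold (names : List String) (cs : List (String × List String))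
    (s : PySem.Set String) (out : List (String × List String)) (pre : String → Bool)
    (hs : ∀ m ∈ names, PySem.Set.contains s m = pre m) :
    (cs.foldl (stepB names) (s, out)).2 = out ++ bkts names cs pre
      ∧ ∀ m ∈ names, PySem.Set.contains (cs.foldl (stepB names) (s, out)).1 m
          = (pre m || cs.any (fun p => matchesCat p.2 m)) := by
  induction cs generalizing s out pre with
  | nil => exact ⟨by simp [bkts], fun m hm => by simpa using hs m hm⟩
  | cons p t ih =>
    obtain ⟨c, kws⟩ := p
    rw [List.foldl_cons, bkts]
    have hb : names.filter (fun m => !(PySem.Set.contains s m) && matchesCat kws m)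
        = names.filter (fun m => !pre m && matchesCat kws m) :=
      List.filter_congr (fun m hm => by rw [hs m hm])
    by_cases hempty : (names.filter (fun m => !pre m && matchesCat kws m)).isEmpty = true
    · have hstep : stepB names (s, out) (c, kws) = (s, out) := by
        unfold stepB
        simp only [hb, hempty, if_true]
      rw [hstep]
      simp only [hempty, if_true]
      have hnone : ∀ m ∈ names, matchesCat kws m = true → pre m = true := by
        intro m hm hmt
        by_contra hp
        have hpf : pre m = false := by simpa using hp
        have hmemf : m ∈ names.filter (fun m => !pre m && matchesCat kws m) :=
          List.mem_filter.mpr ⟨hm, by simp [hmt, hpf]⟩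
        rw [List.isEmpty_iff] at hempty
        rw [hempty] at hmemf
        simp at hmemf
      have hpre' : ∀ m ∈ names, PySem.Set.contains s m = (pre m || matchesCat kws m) := by
        intro m hm
        rw [hs m hm]
        by_cases hmt : matchesCat kws m = true
        · simp [hmt, hnone m hm hmt]
        · have hf : matchesCat kws m = false := by simpa using hmt
          simp [hf]
      obtain ⟨h1, h2⟩ := ih s out (fun m => pre m || matchesCat kws m) hpre'
      refine ⟨by rw [h1, List.nil_append], fun m hm => ?_⟩
      rw [h2 m hm, List.any_cons]
      simp only [Bool.or_assoc]
    · have hstep : stepB names (s, out) (c, kws)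
          = (PySem.Set.update s (names.filter (fun m => !pre m && matchesCat kws m)),
             out ++ [(c, names.filter (fun m => !pre m && matchesCat kws m))]) := by
        unfold stepB
        simp only [hb]
        rw [if_neg hempty]
      rw [hstep]
      rw [if_neg hempty]
      have hpre' : ∀ m ∈ names,
          PySem.Set.contains (PySem.Set.update s (names.filter (fun m => !pre m && matchesCat kws m))) m
            = (pre m || matchesCat kws m) := by
        intro m hm
        rw [contains_update_iff, hs m hm]
        by_cases hmem : m ∈ names.filter (fun m => !pre m && matchesCat kws m)
        · have hx := List.mem_filter.mp hmem
          simp only [Bool.and_eq_true] at hx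
          simp [hmem, hx.2.2]
        · simp only [hmem, decide_false, Bool.or_false]
          by_cases hp : pre m = true
          · simp [hp]
          · have hp' : pre m = false := by simpa using hp
            simp only [hp', Bool.false_or]
            by_cases hmt : matchesCat kws m = true
            · exact absurd (List.mem_filter.mpr ⟨hm, by simp [hp', hmt]⟩) hmem
            · have hf : matchesCat kws m = false := by simpa using hmt
              simp [hf]
      obtain ⟨h1, h2⟩ := ih _ (out ++ [(c, names.filter (fun m => !pre m && matchesCat kws m))])
        (fun m => pre m || matchesCat kws m) hpre'
      refine ⟨by rw [h1, List.append_assoc], fun m hm => ?_⟩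
      rw [h2 m hm, List.any_cons]
      simp only [Bool.or_assoc]

theorem firstIn_cons (c : String) (kws : List String) (t : List (String × List String)) (m : String) :
    firstIn ((c, kws) :: t) m = if matchesCat kws m then some c else firstIn t m := by
  unfold firstIn
  rw [List.find?_cons]
  by_cases h : matchesCat kws m
  · simp [h]
  · have hf : matchesCat kws m = false := by simpa using h
    simp [hf]

theorem firstIn_mem (t : List (String × List String)) (m x : String)
    (h : firstIn t m = some x) : x ∈ t.map (·.1) := by
  unfold firstIn at h
  obtain ⟨p, hp, rfl⟩ := Option.map_eq_some_iff.mp h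
  exact List.mem_map.mpr ⟨p, List.mem_of_find?_eq_some hp, rfl⟩

theorem bkts_eq (names : List String) (cs : List (String × List String))
    (hn : (cs.map (·.1)).Nodup) (pre : String → Bool) :
    bkts names cs pre
      = (cs.map (fun p => (p.1, names.filter
            (fun m => !pre m && (firstIn cs m == some p.1))))).filter
          (fun q => !q.2.isEmpty) := by
  induction cs generalizing pre with
  | nil => rfl
  | cons p t ih =>
    obtain ⟨c, kws⟩ := p
    have hcnot : c ∉ t.map (·.1) := by
      rw [List.map_cons, List.nodup_cons] at hn
      exact fun hc => hn.1 (by simpa using hc)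
    have hnt : (t.map (·.1)).Nodup := by
      rw [List.map_cons, List.nodup_cons] at hn
      exact hn.2
    rw [bkts, List.map_cons, List.filter_cons]
    have hhead : names.filter (fun m => !pre m && (firstIn ((c, kws) :: t) m == some c))
        = names.filter (fun m => !pre m && matchesCat kws m) := by
      apply List.filter_congr
      intro m _
      rw [firstIn_cons]
      by_cases hmt : matchesCat kws m
      · simp [hmt]
      · have hf : matchesCat kws m = false := by simpa using hmt
        simp only [hf, Bool.false_eq_true, if_false, Bool.and_false]
        cases hx : firstIn t m with
        | none => simp
        | some x =>
          have hxc : x ≠ c := fun he => hcnot (he ▸ firstIn_mem t m x hx)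
          simp [hxc]
    have htail : t.map (fun p => (p.1, names.filter
          (fun m => !pre m && (firstIn ((c, kws) :: t) m == some p.1))))
        = t.map (fun p => (p.1, names.filter
          (fun m => !(pre m || matchesCat kws m) && (firstIn t m == some p.1)))) := by
      apply List.map_congr_left
      intro q hq
      have hqc : q.1 ≠ c := fun he => hcnot (he ▸ List.mem_map.mpr ⟨q, hq, rfl⟩)
      congr 1
      apply List.filter_congr
      intro m _
      rw [firstIn_cons]
      by_cases hmt : matchesCat kws m
      · have hne : c ≠ q.1 := fun he' => hqc he'.symm
        simp [hmt, hne]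
      · have hf : matchesCat kws m = false := by simpa using hmt
        simp [hf]
    rw [hhead, htail, ih hnt]
    by_cases he : (names.filter (fun m => !pre m && matchesCat kws m)).isEmpty = true
    · simp [he]
    · simp [he]

theorem keyOf_other_iff (m : String) :
    (keyOfA m == "other") = !(healthCategories.any (fun p => matchesCat p.2 m)) := by
  unfold keyOfA
  cases hfi : firstIn healthCategories m with
  | none =>
    have hnone := hfi
    unfold firstIn at hnone
    rw [Option.map_eq_none_iff] at hnone
    have : healthCategories.any (fun p => matchesCat p.2 m) = false := by
      rw [List.any_eq_false]
      exact List.find?_eq_none.mp hnone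
    simp [this]
  | some x =>
    have hx : x ∈ healthCategories.map (·.1) := firstIn_mem _ _ _ hfi
    have hxo : x ≠ "other" := by
      intro he
      rw [he] at hx
      revert hx
      decide
    have hany : healthCategories.any (fun p => matchesCat p.2 m) = true := by
      unfold firstIn at hfi
      obtain ⟨p, hp, _⟩ := Option.map_eq_some_iff.mp hfi
      have hpx := List.find?_some (p := fun (q : String × List String) => matchesCat q.2 m) hp
      exact List.any_eq_true.mpr ⟨p, List.mem_of_find?_eq_some hp, hpx⟩
    simp [hany, hxo]

theorem mem_map_keyOf_iff (names : List String) :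
    "other" ∈ names.map keyOfA ↔ names.filter (fun m => keyOfA m == "other") ≠ [] := by
  rw [List.mem_map]
  constructor
  · rintro ⟨m, hm, he⟩ hnil
    rw [List.filter_eq_nil_iff] at hnil
    exact hnil m hm (by simp [he])
  · intro hne
    rcases List.exists_mem_of_ne_nil _ hne with ⟨m, hm⟩
    rw [List.mem_filter] at hm
    exact ⟨m, hm.1, by simpa using hm.2⟩

theorem main_eq (names : List String) :
    (loopA (healthCategories.foldl (fun d p => d.insert p.1 ([] : List String)) PySem.Dict.empty)
        names).items.filter (fun p => !p.2.isEmpty)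
      = (let st := healthCategories.foldl (stepB names) (PySem.Set.empty, []);
         let other := names.filter (fun m => !(PySem.Set.contains st.1 m));
         if other.isEmpty then st.2 else st.2 ++ [("other", other)]) := by
  dsimp only
  obtain ⟨h1, h2⟩ := Bfold names healthCategories PySem.Set.empty [] (fun _ => false)
    (fun m _ => rfl)
  rw [A_closed, h1, List.nil_append, bkts_eq names healthCategories (by decide)]
  set st := healthCategories.foldl (stepB names) (PySem.Set.empty, [])
  have hOB : names.filter (fun m => !(PySem.Set.contains st.1 m))
      = names.filter (fun m => keyOfA m == "other") := by
    apply List.filter_congr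
    intro m hm
    rw [h2 m hm, Bool.false_or, keyOf_other_iff]
  have hpart1 : ((healthCategories.map (·.1)).map
        (fun c => (c, names.filter (fun m => keyOfA m == c)))).filter (fun p => !p.2.isEmpty)
      = (healthCategories.map (fun p => (p.1, names.filter
            (fun m => !(fun _ => false) m && (firstIn healthCategories m == some p.1))))).filter
          (fun q => !q.2.isEmpty) := by
    have hmap : (healthCategories.map (·.1)).map (fun c => (c, names.filter (fun m => keyOfA m == c)))
        = healthCategories.map (fun p => (p.1, names.filter
            (fun m => !(fun _ => false) m && (firstIn healthCategories m == some p.1)))) := by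
      rw [List.map_map]
      apply List.map_congr_left
      intro p hp
      have hp1 : p.1 ≠ "other" := by
        have hall : ∀ q ∈ healthCategories, q.1 ≠ "other" := by decide
        exact hall p hp
      have hfilter : names.filter (fun m => keyOfA m == p.1)
          = names.filter (fun m => !(fun _ => false) m && (firstIn healthCategories m == some p.1)) := by
        apply List.filter_congr
        intro m _
        simp only [Bool.not_false, Bool.true_and]
        unfold keyOfA
        cases hfi : firstIn healthCategories m with
        | none =>
          have hob : ("other" == p.1) = false := by
            have : "other" ≠ p.1 := fun he' => hp1 he'.symm
            simpa using this
          simp [hob]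
        | some x => simp
      simp only [Function.comp_def]
      rw [hfilter]
    rw [hmap]
  rw [List.map_append, List.filter_append, hpart1, hOB]
  by_cases hoth : names.filter (fun m => keyOfA m == "other") = []
  · have hnm : "other" ∉ names.map keyOfA := by
      rw [mem_map_keyOf_iff]
      simp [hoth]
    rw [if_neg hnm]
    simp [hoth]
  · have hnm : "other" ∈ names.map keyOfA := (mem_map_keyOf_iff names).mpr hoth
    rw [if_pos hnm]
    have hne : (names.filter (fun m => keyOfA m == "other")).isEmpty = false := by
      simpa [List.isEmpty_eq_false_iff] using hoth
    simp [hne]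


-- ===== VERDICT (by name: the statement is the Claim_ definition above) =====
theorem categorize_health_metrics_spec : Claim_equal_categorize_health_metrics := by
  intro metrics _
  unfold Spec_categorize_health_metrics categorize_health_metrics categorize_health_metrics_alt
  exact main_eq (PySem.Set.ofList (metrics.map (·.1)))
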